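-- pv_equiv track=rewrite | github.com/pypi-data/pypi-mirror-395 | packages/pyelling/pyelling-0.1.0-py3-none-any.whl/pyelling/emotional_styles.py | SARCASTICALLY
-- ===== SOURCE A (Python) =====
-- from typing import Union, List
--
-- def SARCASTICALLY(text: Union[str, List[str]]) -> Union[str, List[str]]:
--     """
--     ADD SARCASTIC TONE TO TEXT BY ALTERNATING CASE.
--
--     ARGS:
--         TEXT: INPUT TEXT OR LIST OF STRINGS TO TRANSFORM
--
--     RETURNS:
--         TEXT WITH ALTERNATING CASE FOR A SARCASTIC TONE
--     """
--     def _SARCASTIFY(s: str) -> str: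
--         result = ""
--         for i, char in enumerate(s):
--             if i % 2 == 0:
--                 result += char.lower()
--             else:
--                 result += char.upper()
--         return result
--
--     if isinstance(text, list):
--         return [_SARCASTIFY(t) for t in text]
--     return _SARCASTIFY(text)
-- ===== SOURCE B (Python) =====
-- def SARCASTICALLY(text):
--     """Sarcastic alternating case via two strided slice passes plus an interleaving merge."""
--     def _sarcastify(s):
--         lo = s[0::2].lower()
--         up = s[1::2].upper()
--         out = []
--         for a, b in zip(lo, up):
--             out.append(a)
--             out.append(b)
--         out.extend(lo[len(up):])
--         return "".join(out)
--     if isinstance(text, list):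
--         return [_sarcastify(t) for t in text]
--     return _sarcastify(text)
-- ===== Notes on version B (the rewrite author's own statement) =====
-- stated objective: alternative
-- what changed: Replaces the per-character index-parity loop with two strided slice passes (s[0::2].lower() and s[1::2].upper()) that are then rebuilt by an interleaving zip merge.
import Mathlib
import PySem

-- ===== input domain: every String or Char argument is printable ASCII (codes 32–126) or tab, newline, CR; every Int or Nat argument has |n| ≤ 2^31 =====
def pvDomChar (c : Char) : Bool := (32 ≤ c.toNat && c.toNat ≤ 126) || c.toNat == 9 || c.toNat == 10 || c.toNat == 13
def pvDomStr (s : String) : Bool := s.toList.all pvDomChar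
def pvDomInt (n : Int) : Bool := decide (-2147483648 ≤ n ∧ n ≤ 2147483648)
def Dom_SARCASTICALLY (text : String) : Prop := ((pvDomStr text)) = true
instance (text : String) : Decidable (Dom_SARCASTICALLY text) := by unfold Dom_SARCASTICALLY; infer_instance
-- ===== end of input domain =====

-- B replaces A's per-character index-parity loop by two strided slice passes
-- (s[0::2].lower(), s[1::2].upper()) merged by interleaving — objective: alternative.


-- ===== PORT A =====
-- result = ""; for i, char in enumerate(s): result += char.lower() / char.upper() by parity of i
def SARCASTICALLY (text : String) : String :=
  String.ofList ((PySem.List.enumerate text.toList 0).foldl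
    (fun result p =>
      if PySem.Int.mod p.1 2 == 0 then result ++ [PySem.Chars.lowerChar p.2]
      else result ++ [PySem.Chars.upperChar p.2]) [])

-- ===== PORT B =====
-- lo = s[0::2].lower(); up = s[1::2].upper(); out: zip pairs appended in turn, then lo[len(up):]
def SARCASTICALLY_alt (text : String) : String :=
  let lo := PySem.Chars.lower ((PySem.List.slice? text.toList (some 0) none 2).getD [])
  let up := PySem.Chars.upper ((PySem.List.slice? text.toList (some 1) none 2).getD [])
  let out := (lo.zip up).foldl (fun acc p => (acc ++ [p.1]) ++ [p.2]) []
  String.ofList (out ++ lo.drop up.length)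

-- ===== PRECONDITION & SPEC =====
def Spec_SARCASTICALLY (text : String) (out : String) : Prop := out = SARCASTICALLY_alt text
instance (text : String) (out : String) : Decidable (Spec_SARCASTICALLY text out) := by unfold Spec_SARCASTICALLY; infer_instance

-- ===== CLAIM (what is proved, stated in full; the proofs are below) =====
def Claim_equal_SARCASTICALLY : Prop := ∀ (text : String), Dom_SARCASTICALLY text → Spec_SARCASTICALLY text (SARCASTICALLY text)

-- ===== LEMMAS AND PROOFS =====

-- elements at even indices
def pvEvens {α : Type} : List α → List α
  | [] => []
  | [a] => [a]
  | a :: _ :: t => a :: pvEvens t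

-- what A's enumerate-fold produces, as a structural recursion carrying the index
def pvAlt (i : Int) : List Char → List Char
  | [] => []
  | c :: cs =>
    (if PySem.Int.mod i 2 == 0 then PySem.Chars.lowerChar c else PySem.Chars.upperChar c)
      :: pvAlt (i + 1) cs

-- B's merge shape: interleave, stopping where the first list ends
def pvMerge : List Char → List Char → List Char
  | [], _ => []
  | xs, [] => xs
  | x :: xs, y :: ys => x :: y :: pvMerge xs ys

theorem pvFoldA (cs : List Char) : ∀ (i : Int) (acc : List Char),
    (PySem.List.enumerate cs i).foldl
      (fun result p =>
        if PySem.Int.mod p.1 2 == 0 then result ++ [PySem.Chars.lowerChar p.2]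
        else result ++ [PySem.Chars.upperChar p.2]) acc = acc ++ pvAlt i cs := by
  induction cs with
  | nil => intro i acc; simp [PySem.List.enumerate_nil, pvAlt]
  | cons c cs ih =>
    intro i acc
    rw [PySem.List.enumerate_cons, List.foldl_cons, ih]
    simp only [pvAlt]
    by_cases h : (PySem.Int.mod i 2 == 0) = true <;>
      simp only [h, if_pos, Bool.false_eq_true, if_false, List.append_assoc,
        List.cons_append, List.nil_append]

theorem pvZipFold (lo : List Char) : ∀ (up acc : List Char),
    ((lo.zip up).foldl (fun acc p => (acc ++ [p.1]) ++ [p.2]) acc) ++ lo.drop up.length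
      = acc ++ pvMerge lo up := by
  induction lo with
  | nil => intro up acc; cases up <;> simp [pvMerge]
  | cons x xs ih =>
    intro up acc
    cases up with
    | nil => simp [pvMerge]
    | cons y ys =>
      simp only [List.zip_cons_cons, List.foldl_cons, List.length_cons, List.drop_succ_cons]
      rw [ih ys (acc ++ [x] ++ [y])]
      simp [pvMerge]

theorem pvAlt_add_two (cs : List Char) : ∀ i : Int, pvAlt (i + 2) cs = pvAlt i cs := by
  induction cs with
  | nil => intro i; rfl
  | cons c cs ih =>
    intro i
    have hm : PySem.Int.mod (i + 2) 2 = PySem.Int.mod i 2 := by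
      rw [PySem.Int.mod_eq_emod_of_pos (b := 2) (by norm_num), PySem.Int.mod_eq_emod_of_pos (b := 2) (by norm_num)]
      omega
    simp only [pvAlt, hm]
    rw [show i + 2 + 1 = i + 1 + 2 by ring, ih]

theorem pvEvens_cons {α : Type} (b : α) (t : List α) :
    pvEvens (b :: t) = b :: pvEvens t.tail := by
  cases t <;> simp [pvEvens]

theorem pvMain (cs : List Char) :
    pvAlt 0 cs = pvMerge (List.map PySem.Chars.lowerChar (pvEvens cs))
                         (List.map PySem.Chars.upperChar (pvEvens cs.tail)) := by
  induction cs using pvEvens.induct with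
  | case1 => rfl
  | case2 a => rfl
  | case3 a b t ih =>
    have e0 : (PySem.Int.mod 0 2 == 0) = true := by decide
    have e1 : (PySem.Int.mod (0 + 1) 2 == 0) = false := by decide
    have h2 := pvAlt_add_two t 0
    simp only [pvAlt, e0, e1, if_true, Bool.false_eq_true, if_false, pvEvens, List.tail_cons,
      pvEvens_cons, List.map_cons, pvMerge]
    rw [show (0:Int) + 1 + 1 = 0 + 2 by ring, h2, ih]

-- the two strided slices are exactly the even-index elements of cs and of cs.tail
theorem pvFM {α : Type} (xs : List α) :
    List.filterMap (fun k => xs[2*k]?) (List.range ((xs.length+1)/2)) = pvEvens xs := by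
  induction xs using pvEvens.induct with
  | case1 => simp [pvEvens]
  | case2 a => simp [pvEvens]
  | case3 a b t ih =>
    have hc : ((a :: b :: t).length + 1) / 2 = (t.length+1)/2 + 1 := by simp; omega
    rw [hc, List.range_succ_eq_map]
    have hf : (fun k => (a :: b :: t)[2*(k+1)]?) = (fun k => t[2*k]?) := by
      funext k
      rw [show 2*(k+1) = 2*k+1+1 by ring]
      simp
    simp only [List.filterMap_cons, List.filterMap_map, Function.comp_def]
    simp only [Nat.mul_zero, List.getElem?_cons_zero]
    rw [show (fun k => (a :: b :: t)[2*(k+1)]?) = (fun k => t[2*k]?) from hf]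
    simp [pvEvens, ih]

theorem pvSlice0 {α : Type} (xs : List α) :
    PySem.List.slice? xs (some 0) none 2 = some (pvEvens xs) := by
  simp only [PySem.List.slice?, PySem.List.sliceIndices]
  norm_num
  have hf : (fun x : Nat => xs[(2*(x:Int)).toNat]?) = (fun k : Nat => xs[2*k]?) := by
    funext k
    have h1 : ((2*(k:Int)).toNat) = 2*k := by omega
    rw [h1]
  have hc : (if 0 < xs.length then (((xs.length:Int) + 2 - 1) / 2).toNat else 0) = (xs.length+1)/2 := by
    split <;> omega
  rw [hf, hc, pvFM]

theorem pvSlice1 {α : Type} (xs : List α) :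
    PySem.List.slice? xs (some 1) none 2 = some (pvEvens xs.tail) := by
  cases xs with
  | nil => rfl
  | cons a t =>
    simp only [PySem.List.slice?, PySem.List.sliceIndices]
    norm_num
    have hf : (fun x : Nat => (a :: t)[(1 + 2*(x:Int)).toNat]?) = (fun k : Nat => t[2*k]?) := by
      funext k
      have h1 : ((1 + 2*(k:Int)).toNat) = 2*k+1 := by omega
      rw [h1]
      simp
    have hc : (if 0 < t.length then (((t.length:Int) + 2 - 1) / 2).toNat else 0) = (t.length+1)/2 := by
      split <;> omega
    rw [hf, hc, pvFM]

-- ===== VERDICT (by name: the statement is the Claim_ definition above) =====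
theorem SARCASTICALLY_spec : Claim_equal_SARCASTICALLY := by
  intro text _
  unfold Spec_SARCASTICALLY SARCASTICALLY SARCASTICALLY_alt
  rw [pvFoldA, pvSlice0, pvSlice1]
  simp only [Option.getD_some, PySem.Chars.lower, PySem.Chars.upper]
  rw [pvZipFold]
  simp [pvMain]
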